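-- pv_equiv track=rewrite | github.com/ch1heto/University_bot | app/unified_pipeline.py | _merge_slot_contexts
-- ===== SOURCE A (Python) =====
-- from typing import Optional, Dict, Any, List
--
-- def _merge_slot_contexts(slot_blocks: List[Dict[str, str]]) -> str:
--     # лёгкое ограничение, чтобы не раздувать контекст
--     parts = []
--     total_limit = 24000
--     per_slot_limit = 7000
--     total = 0
--
--     for b in slot_blocks:
--         ctx = b.get("context") or ""
--         if len(ctx) > per_slot_limit:
--             ctx = ctx[:per_slot_limit] + "\n\n[... контекст сокращён ...]"
--         block = (
--             f"=== ПУНКТ: {b.get('title','')} ===\n"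
--             f"Под-вопрос: {b.get('subq','')}\n"
--             f"Контекст:\n{ctx}\n"
--         )
--         if total + len(block) > total_limit:
--             break
--         parts.append(block)
--         total += len(block)
--
--     return "\n\n---\n\n".join(parts)
-- ===== SOURCE B (Python) =====
-- def _merge_slot_contexts(slot_blocks):
--     total_limit = 24000
--     per_slot_limit = 7000
--
--     def fmt(b):
--         ctx = b.get("context") or ""
--         if len(ctx) > per_slot_limit:
--             ctx = ctx[:per_slot_limit] + "\n\n[... контекст сокращён ...]"
--         return (
--             "=== ПУНКТ: " + b.get("title", "") + " ===\n"
--             "Под-вопрос: " + b.get("subq", "") + "\n"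
--             "Контекст:\n" + ctx + "\n"
--         )
--
--     blocks = [fmt(b) for b in slot_blocks]
--     lens = [len(x) for x in blocks]
--     keep = 0
--     run = 0
--     while keep < len(lens) and run + lens[keep] <= total_limit:
--         run += lens[keep]
--         keep += 1
--     return "\n\n---\n\n".join(blocks[:keep])
-- ===== Notes on version B (the rewrite author's own statement) =====
-- stated objective: alternative
-- what changed: B separates construction from limiting: it builds all formatted blocks in one comprehension, then counts the longest prefix whose running length total stays within the limit, and joins that prefix, instead of A's single loop interleaving formatting, accumulation and an early break.
import Mathlib
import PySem

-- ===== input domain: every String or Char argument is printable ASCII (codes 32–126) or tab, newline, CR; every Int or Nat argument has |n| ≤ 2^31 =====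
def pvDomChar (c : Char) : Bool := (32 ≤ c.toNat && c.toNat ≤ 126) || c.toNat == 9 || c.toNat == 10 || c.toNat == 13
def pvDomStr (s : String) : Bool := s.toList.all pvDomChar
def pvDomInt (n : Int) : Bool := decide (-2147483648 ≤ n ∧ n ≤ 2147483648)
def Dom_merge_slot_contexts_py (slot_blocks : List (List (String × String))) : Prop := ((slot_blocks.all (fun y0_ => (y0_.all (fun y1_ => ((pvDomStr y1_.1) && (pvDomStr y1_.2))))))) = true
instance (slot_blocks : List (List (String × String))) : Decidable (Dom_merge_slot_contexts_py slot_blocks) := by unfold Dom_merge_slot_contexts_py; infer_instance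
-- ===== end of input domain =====

-- B separates block construction from the length-limiting pass (build all blocks, count the
-- fitting prefix, join it) instead of A's single loop with running total and early break;
-- objective: alternative decomposition, same cost.

-- ===== PORT A =====

-- shared formatting of one slot block, exactly the Python text:
-- b.get("context") or "" — get returns None only when the key is absent, and an empty string
-- stays empty, so the `or ""` is exactly getD with default "".
def pvBlockText (b : List (String × String)) : String :=
  let ctx0 := (PySem.Dict.mk b).getD "context" ""
  let ctx := if PySem.Str.len ctx0 > 7000
    then PySem.Str.slice ctx0 none (some 7000) ++ "\n\n[... контекст сокращён ...]"
    else ctx0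
  "=== ПУНКТ: " ++ (PySem.Dict.mk b).getD "title" "" ++ " ===\n" ++
  "Под-вопрос: " ++ (PySem.Dict.mk b).getD "subq" "" ++ "\n" ++
  "Контекст:\n" ++ ctx ++ "\n"

-- A's loop: state (parts, total); the `break` ends the recursion returning parts as is.
def pvLoopA : List (List (String × String)) → List String → Int → List String
  | [], parts, _ => parts
  | b :: rest, parts, total =>
    let block := pvBlockText b
    if total + PySem.Str.len block > 24000 then parts
    else pvLoopA rest (parts ++ [block]) (total + PySem.Str.len block)

def merge_slot_contexts_py (slot_blocks : List (List (String × String))) : String :=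
  PySem.Str.join "\n\n---\n\n" (pvLoopA slot_blocks [] 0)

-- ===== PORT B =====

-- Source B's while loop: how many leading lengths fit, accumulating the running total.
def pvKeep : List Int → Int → Nat
  | [], _ => 0
  | l :: ls, run => if run + l ≤ 24000 then 1 + pvKeep ls (run + l) else 0

def merge_slot_contexts_py_alt (slot_blocks : List (List (String × String))) : String :=
  let blocks := slot_blocks.map pvBlockText
  let lens := blocks.map (fun x => PySem.Str.len x)
  let keep := pvKeep lens 0
  PySem.Str.join "\n\n---\n\n" (blocks.take keep)

-- ===== PRECONDITION & SPEC =====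
def Spec_merge_slot_contexts_py (slot_blocks : List (List (String × String))) (out : String) : Prop := out = merge_slot_contexts_py_alt slot_blocks
instance (slot_blocks : List (List (String × String))) (out : String) : Decidable (Spec_merge_slot_contexts_py slot_blocks out) := by unfold Spec_merge_slot_contexts_py; infer_instance

-- ===== CLAIM (what is proved, stated in full; the proofs are below) =====
def Claim_equal_merge_slot_contexts_py : Prop := ∀ (slot_blocks : List (List (String × String))), Dom_merge_slot_contexts_py slot_blocks → Spec_merge_slot_contexts_py slot_blocks (merge_slot_contexts_py slot_blocks)

-- ===== LEMMAS AND PROOFS =====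

-- A's interleaved loop returns the already-kept parts followed by the fitting prefix of the
-- remaining blocks, where "fitting" is exactly B's pvKeep count on the remaining lengths.
theorem pvLoopA_eq (bs : List (List (String × String))) :
    ∀ (parts : List String) (total : Int),
      pvLoopA bs parts total =
        parts ++ (bs.map pvBlockText).take
          (pvKeep ((bs.map pvBlockText).map (fun x => PySem.Str.len x)) total) := by
  induction bs with
  | nil => intro parts total; simp [pvLoopA, pvKeep]
  | cons b rest ih =>
    intro parts total
    simp only [pvLoopA, pvKeep, List.map_cons]
    by_cases h : total + PySem.Str.len (pvBlockText b) > 24000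
    · rw [if_pos h, if_neg (by omega : ¬ total + PySem.Str.len (pvBlockText b) ≤ 24000)]
      simp
    · rw [if_neg h, if_pos (by omega : total + PySem.Str.len (pvBlockText b) ≤ 24000)]
      rw [ih, Nat.add_comm 1 _, List.take_succ_cons]
      simp

-- ===== VERDICT (by name: the statement is the Claim_ definition above) =====
theorem merge_slot_contexts_py_spec : Claim_equal_merge_slot_contexts_py := by
  intro slot_blocks _
  show merge_slot_contexts_py slot_blocks = merge_slot_contexts_py_alt slot_blocks
  simp [merge_slot_contexts_py, merge_slot_contexts_py_alt, pvLoopA_eq]
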